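-- pv_equiv track=rewrite | github.com/PranavSalunke/Cryptography-Systems | frequencyAnalysis.py | joinLetterFreqency
-- ===== SOURCE A (Python) =====
-- def joinLetterFreqency(frequencyList):
--     # returns list of lists
--     # inside list is a list of letters with the same freqency/ groups letters with same freqency
--     #   the group of letters is done alphabetically
--     # frequencyList is retrieved from getFrequencyAnalysis
--     p1 = 0
--     p2 = 0
--     frequencyListLetters = []
--     while(p2 < len(frequencyList) and p1 < len(frequencyList)):
--         sublist = []
--         n1, l1 = frequencyList[p1]
--         n2, l2 = frequencyList[p2]
--         while((p2 < len(frequencyList) and p1 < len(frequencyList)) and frequencyList[p1][0] == frequencyList[p2][0]):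
--             sublist.append(frequencyList[p2][1])
--             p2 = p2 + 1
--
--         p1 = p2
--         # sublist.sort()
--         frequencyListLetters.append(sublist)
--
--     return frequencyListLetters
-- ===== SOURCE B (Python) =====
-- def joinLetterFreqency(frequencyList):
--     if not frequencyList:
--         return []
--     n = len(frequencyList)
--     letters = [l for _, l in frequencyList]
--     cuts = [0] + [i for i in range(1, n) if frequencyList[i][0] != frequencyList[i - 1][0]] + [n]
--     return [letters[a:b] for a, b in zip(cuts, cuts[1:])]
-- ===== Notes on version B (the rewrite author's own statement) =====
-- stated objective: alternative
-- what changed: Replaced A's two-pointer while-loop state machine with a two-stage computation: first collect the boundary indices where the frequency changes, then slice the letter list between consecutive boundaries.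
import Mathlib
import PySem

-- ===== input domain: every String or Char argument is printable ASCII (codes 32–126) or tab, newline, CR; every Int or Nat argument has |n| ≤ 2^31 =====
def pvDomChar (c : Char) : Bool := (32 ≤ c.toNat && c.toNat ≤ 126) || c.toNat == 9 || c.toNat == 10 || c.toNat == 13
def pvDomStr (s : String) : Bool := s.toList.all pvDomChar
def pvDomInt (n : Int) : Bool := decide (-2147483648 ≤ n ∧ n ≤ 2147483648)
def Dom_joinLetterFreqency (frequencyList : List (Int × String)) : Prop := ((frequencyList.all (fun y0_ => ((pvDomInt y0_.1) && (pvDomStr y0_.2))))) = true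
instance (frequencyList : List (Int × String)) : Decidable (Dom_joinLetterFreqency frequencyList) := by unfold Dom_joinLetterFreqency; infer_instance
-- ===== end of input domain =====

-- B replaces A's two-pointer while-loop state machine by a two-stage computation:
-- first find the boundary indices where the frequency changes, then cut the letter
-- list at those indices (objective: alternative).

-- ===== PORT A =====
-- inner while loop: appends letters while frequencyList[p1][0] == frequencyList[p2][0];
-- fuel (≥ remaining length) only makes the loop total, the guard is Python's
def pyInner (fl : List (Int × String)) (p1 : Nat) : Nat → Nat → List String → List String × Nat
  | 0, p2, sub => (sub, p2)
  | fuel+1, p2, sub =>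
    if p2 < fl.length ∧ p1 < fl.length ∧ (fl.getD p1 (0, "")).1 = (fl.getD p2 (0, "")).1 then
      pyInner fl p1 fuel (p2+1) (sub ++ [(fl.getD p2 (0, "")).2])
    else (sub, p2)

-- outer while loop: runs inner loop, sets p1 = p2, appends the sublist
def pyOuter (fl : List (Int × String)) : Nat → Nat → Nat → List (List String) → List (List String)
  | 0, _, _, acc => acc
  | fuel+1, p1, p2, acc =>
    if p2 < fl.length ∧ p1 < fl.length then
      let r := pyInner fl p1 fl.length p2 []
      pyOuter fl fuel r.2 r.2 (acc ++ [r.1])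
    else acc

def joinLetterFreqency (frequencyList : List (Int × String)) : List (List String) :=
  pyOuter frequencyList (frequencyList.length + 1) 0 0 []

-- ===== PORT B =====
-- Source B: letters = [l for _, l in fl]; cuts = [0] + boundary indices + [n];
-- result = [letters[a:b] for a, b in zip(cuts, cuts[1:])].
-- range(1, n) is List.range' 1 (n-1); every index i, i-1 used is in range, so fl[i]
-- is getD (exact); letters[a:b] with 0 ≤ a ≤ b ≤ n is (letters.drop a).take (b-a)
-- (exact); cuts[1:] with cuts nonempty is cuts.tail (exact).
def joinLetterFreqency_alt (frequencyList : List (Int × String)) : List (List String) :=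
  if frequencyList = [] then []
  else
    let n := frequencyList.length
    let letters := frequencyList.map Prod.snd
    let cuts : List Nat :=
      0 :: (List.range' 1 (n-1)).filter
        (fun i => decide (¬ (frequencyList.getD i (0,"")).1 = (frequencyList.getD (i-1) (0,"")).1)) ++ [n]
    (cuts.zip cuts.tail).map (fun p => (letters.drop p.1).take (p.2 - p.1))

-- ===== PRECONDITION & SPEC =====
def Spec_joinLetterFreqency (frequencyList : List (Int × String)) (out : List (List String)) : Prop := out = joinLetterFreqency_alt frequencyList
instance (frequencyList : List (Int × String)) (out : List (List String)) : Decidable (Spec_joinLetterFreqency frequencyList out) := by unfold Spec_joinLetterFreqency; infer_instance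

-- ===== CLAIM (what is proved, stated in full; the proofs are below) =====
def Claim_equal_joinLetterFreqency : Prop := ∀ (frequencyList : List (Int × String)), Dom_joinLetterFreqency frequencyList → Spec_joinLetterFreqency frequencyList (joinLetterFreqency frequencyList)

-- ===== LEMMAS AND PROOFS =====

-- reference function: recursive grouping of maximal runs of equal frequency;
-- both ports are proved equal to it
def pvGrp : List (Int × String) → List (List String)
  | [] => []
  | (n, l) :: rest =>
    (l :: (rest.takeWhile (fun q => decide (n = q.1))).map Prod.snd)
      :: pvGrp (rest.dropWhile (fun q => decide (n = q.1)))
termination_by fl => fl.length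
decreasing_by
  exact Nat.lt_succ_of_le (List.length_dropWhile_le _ _)

theorem dropWhile_eq_drop_len_takeWhile {α : Type} (p : α → Bool) (l : List α) :
    l.dropWhile p = l.drop (l.takeWhile p).length := by
  induction l with
  | nil => simp
  | cons x t ih =>
    by_cases h : p x = true <;> simp [h, ih]

theorem pvGrp_cons (x : Int × String) (rest : List (Int × String)) :
    pvGrp (x :: rest) =
      (x.2 :: (rest.takeWhile (fun q => decide (x.1 = q.1))).map Prod.snd)
        :: pvGrp (rest.dropWhile (fun q => decide (x.1 = q.1))) := by
  obtain ⟨n, l⟩ := x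
  rw [pvGrp]

-- ─── A-side: the two-pointer loops compute pvGrp ───

theorem pyInner_spec (fl : List (Int × String)) (p1 : Nat) (h1 : p1 < fl.length) :
    ∀ fuel p2 sub, fl.length - p2 ≤ fuel →
    pyInner fl p1 fuel p2 sub =
      (sub ++ ((fl.drop p2).takeWhile (fun q => decide ((fl.getD p1 (0, "")).1 = q.1))).map Prod.snd,
       p2 + ((fl.drop p2).takeWhile (fun q => decide ((fl.getD p1 (0, "")).1 = q.1))).length) := by
  intro fuel
  induction fuel with
  | zero =>
    intro p2 sub h
    have hle : fl.length ≤ p2 := by omega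
    simp [pyInner, List.drop_eq_nil_of_le hle]
  | succ fuel ih =>
    intro p2 sub h
    by_cases hp2 : p2 < fl.length
    · have hdrop : fl.drop p2 = fl[p2] :: fl.drop (p2+1) := List.drop_eq_getElem_cons hp2
      have hget : fl.getD p2 (0, "") = fl[p2] := List.getD_eq_getElem fl _ hp2
      have hfuel : fl.length - (p2+1) ≤ fuel := by omega
      by_cases heq : (fl.getD p1 (0, "")).1 = fl[p2].1
      · have hcond : p2 < fl.length ∧ p1 < fl.length ∧
            (fl.getD p1 (0, "")).1 = (fl.getD p2 (0, "")).1 :=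
          ⟨hp2, h1, by rw [hget]; exact heq⟩
        rw [pyInner, if_pos hcond, ih (p2+1) _ hfuel, hdrop, List.takeWhile_cons,
          if_pos (by simpa using heq)]
        simp [List.append_assoc]
        exact ⟨congrArg Prod.snd hget, by omega⟩
      · have hcond : ¬(p2 < fl.length ∧ p1 < fl.length ∧
            (fl.getD p1 (0, "")).1 = (fl.getD p2 (0, "")).1) :=
          fun ⟨_, _, hx⟩ => heq (by rwa [hget] at hx)
        rw [pyInner, if_neg hcond, hdrop, List.takeWhile_cons,
          if_neg (by simpa using heq)]
        simp
    · have hle : fl.length ≤ p2 := by omega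
      rw [pyInner, if_neg (by omega)]
      simp [List.drop_eq_nil_of_le hle]

theorem pyOuter_spec (fl : List (Int × String)) :
    ∀ fuel p acc, fl.length - p < fuel →
    pyOuter fl fuel p p acc = acc ++ pvGrp (fl.drop p) := by
  intro fuel
  induction fuel with
  | zero => intro p acc h; omega
  | succ fuel ih =>
    intro p acc h
    by_cases hp : p < fl.length
    · have hdrop : fl.drop p = fl[p] :: fl.drop (p+1) := List.drop_eq_getElem_cons hp
      have hget : fl.getD p (0, "") = fl[p] := List.getD_eq_getElem fl _ hp
      rw [pyOuter, if_pos ⟨hp, hp⟩]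
      rw [pyInner_spec fl p hp fl.length p [] (by omega)]
      simp only [hget, hdrop, List.takeWhile_cons, decide_eq_true_eq]
      simp only [if_true]
      set pred := (fun q : Int × String => decide (fl[p].1 = q.1)) with hpred
      set tw := (fl.drop (p+1)).takeWhile pred with htw
      simp only [List.map_cons, List.length_cons]
      have harith : p + (tw.length + 1) = p + 1 + tw.length := by omega
      rw [harith, ih (p + 1 + tw.length) _ (by omega)]
      have hdrop2 : fl.drop (p + 1 + tw.length) = (fl.drop (p+1)).dropWhile pred := by
        rw [dropWhile_eq_drop_len_takeWhile, ← htw, List.drop_drop]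
      rw [hdrop2, pvGrp_cons]
      simp only [List.nil_append, List.append_assoc, List.singleton_append]
      exact congrArg (acc ++ ·) rfl
    · rw [pyOuter, if_neg (by omega)]
      simp [List.drop_eq_nil_of_le (by omega : fl.length ≤ p), pvGrp]

-- ─── B-side: boundary indices + cutting compute pvGrp ───

-- the boundary predicate and cut list of the B port, named for the proofs
def pvPred (fl : List (Int × String)) (i : Nat) : Bool :=
  decide (¬ (fl.getD i (0,"")).1 = (fl.getD (i-1) (0,"")).1)

def pvCuts (fl : List (Int × String)) : List Nat :=
  0 :: (List.range' 1 (fl.length - 1)).filter (pvPred fl) ++ [fl.length]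

theorem alt_eq_cuts (fl : List (Int × String)) (h : fl ≠ []) :
    joinLetterFreqency_alt fl =
      ((pvCuts fl).zip (pvCuts fl).tail).map
        (fun p => (((fl.map Prod.snd).drop p.1).take (p.2 - p.1))) := by
  unfold joinLetterFreqency_alt pvCuts pvPred
  rw [if_neg h]

-- within a run: every index up to the takeWhile length carries the head frequency
theorem getD_run (x : Int × String) (rest : List (Int × String)) (i : Nat)
    (hi : i ≤ (rest.takeWhile (fun q => decide (x.1 = q.1))).length) :
    ((x :: rest).getD i (0,"")).1 = x.1 := by
  cases i with
  | zero => rfl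
  | succ j =>
    set tw := rest.takeWhile (fun q => decide (x.1 = q.1)) with htw
    have hj : j < tw.length := by omega
    have hjr : j < rest.length :=
      lt_of_lt_of_le hj (by rw [htw]; exact (List.takeWhile_prefix _).length_le)
    have hpre : tw <+: rest := List.takeWhile_prefix _
    have hgd : (x :: rest).getD (j+1) (0,"") = rest[j] := by
      simpa using List.getD_eq_getElem rest (0,"") hjr
    have hel : tw[j] = rest[j] := hpre.getElem hj
    have hmem : tw[j] ∈ rest.takeWhile (fun q => decide (x.1 = q.1)) := by
      rw [← htw]; exact List.getElem_mem hj
    have := List.mem_takeWhile_imp hmem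
    rw [hgd, ← hel]
    exact (of_decide_eq_true this).symm

-- the boundary list of x :: rest: empty if the whole list is one run, else the first
-- boundary k followed by the (shifted) boundaries of the remainder
theorem bnds_split (x : Int × String) (rest : List (Int × String)) :
    letI tw := rest.takeWhile (fun q => decide (x.1 = q.1))
    letI fl := x :: rest
    letI k := tw.length + 1
    (List.range' 1 (fl.length - 1)).filter (pvPred fl) =
      if k = fl.length then []
      else k :: ((List.range' 1 ((fl.drop k).length - 1)).filter (pvPred (fl.drop k))).map (k + ·) := by
  set tw := rest.takeWhile (fun q => decide (x.1 = q.1)) with htw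
  set fl := x :: rest with hfl
  set k := tw.length + 1 with hk
  have hkle : k ≤ fl.length := by
    have := (List.takeWhile_prefix (l := rest) (fun q => decide (x.1 = q.1))).length_le
    rw [← htw] at this
    simp [hk, hfl]; omega
  have hsplit : List.range' 1 (fl.length - 1) = List.range' 1 (k-1) ++ List.range' k (fl.length - k) := by
    have := List.range'_append (s := 1) (m := k-1) (n := fl.length - k) (step := 1)
    rw [show 1 + 1 * (k-1) = k by omega] at this
    rw [show fl.length - 1 = k - 1 + (fl.length - k) from by omega]
    exact this.symm
  have hfilter1 : (List.range' 1 (k-1)).filter (pvPred fl) = [] := by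
    rw [List.filter_eq_nil_iff]
    intro i hi
    rw [List.mem_range'] at hi
    obtain ⟨j, hj, rfl⟩ := hi
    have h1 : (fl.getD (1 + 1*j) (0,"")).1 = x.1 := getD_run x rest _ (by simp only [← htw]; omega)
    have h2 : (fl.getD (1 + 1*j - 1) (0,"")).1 = x.1 := getD_run x rest _ (by simp only [← htw]; omega)
    simp only [pvPred, decide_eq_true_eq, not_not]
    rw [h1, h2]
  rw [hsplit, List.filter_append, hfilter1, List.nil_append]
  by_cases hkn : k = fl.length
  · rw [if_pos hkn, show fl.length - k = 0 by omega]
    simp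
  · rw [if_neg hkn]
    have hklt : k < fl.length := lt_of_le_of_ne hkle hkn
    -- the remainder after the first run
    have hdw : rest.dropWhile (fun q => decide (x.1 = q.1)) = fl.drop k := by
      rw [dropWhile_eq_drop_len_takeWhile, ← htw, hfl, hk]
      rfl
    have hlen : (fl.drop k).length = fl.length - k := by simp
    -- head of the remainder breaks the run: pvPred fl k = true
    have hne : (fl.drop k) ≠ [] := by
      intro hcon
      have := congrArg List.length hcon
      simp [hlen] at this
      omega
    obtain ⟨y, ys, hys⟩ := List.exists_cons_of_ne_nil hne
    have hyhead : pvPred fl k = true := by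
      have hheadp : (fun q : Int × String => decide (x.1 = q.1)) y = false := by
        have hdweq : rest.dropWhile (fun q => decide (x.1 = q.1)) = y :: ys := by rw [hdw, hys]
        have hne2 : rest.dropWhile (fun q => decide (x.1 = q.1)) ≠ [] := by
          rw [hdweq]; exact List.cons_ne_nil _ _
        have hhd := List.head_dropWhile_not (fun q : Int × String => decide (x.1 = q.1)) hne2
        have hhy : (rest.dropWhile (fun q => decide (x.1 = q.1))).head hne2 = y := by
          revert hne2 hhd; rw [hdweq]; intro _ _; rfl
        rwa [hhy] at hhd
      have hky : fl.getD k (0,"") = y := by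
        have h1 : (fl.drop k).getD 0 (0,"") = y := by rw [hys]; rfl
        have h2 : (fl.drop k).getD 0 (0,"") = fl.getD k (0,"") := by
          rw [List.getD_eq_getElem _ _ (by rw [hys]; simp),
              List.getD_eq_getElem _ _ (by omega : k < fl.length), List.getElem_drop]
        rw [← h2, h1]
      have hprev : (fl.getD (k-1) (0,"")).1 = x.1 := getD_run x rest _ (by simp only [← htw]; omega)
      simp only [pvPred, hky, hprev, decide_eq_true_eq]
      simp only [decide_eq_false_iff_not] at hheadp
      exact fun hcon => hheadp hcon.symm
    -- the boundaries past k are the shifted boundaries of the remainder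
    have hrange : List.range' (k+1) (fl.length - k - 1) = (List.range' 1 (fl.length - k - 1)).map (k + ·) := by
      rw [List.range'_eq_map_range, List.range'_eq_map_range, List.map_map]
      apply List.map_congr_left
      intro a _
      simp; omega
    have hstep : List.range' k (fl.length - k) = k :: List.range' (k+1) (fl.length - k - 1) := by
      rw [show fl.length - k = (fl.length - k - 1) + 1 by omega]
      rw [List.range'_succ]
      norm_num
    rw [hstep, List.filter_cons_of_pos hyhead, hrange, List.filter_map, hlen]
    congr 1
    congr 1
    apply List.filter_congr
    intro i hi
    rw [List.mem_range'] at hi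
    obtain ⟨j, hj, rfl⟩ := hi
    have hlt : k + (1 + 1*j) < fl.length := by omega
    have hg1 : (fl.drop k).getD (1 + 1*j) (0,"") = fl.getD (k + (1 + 1*j)) (0,"") := by
      rw [List.getD_eq_getElem _ _ (by rw [hlen]; omega),
          List.getD_eq_getElem _ _ hlt, List.getElem_drop]
    have hg2 : (fl.drop k).getD (1 + 1*j - 1) (0,"") = fl.getD (k + (1 + 1*j) - 1) (0,"") := by
      rw [List.getD_eq_getElem _ _ (by rw [hlen]; omega),
          List.getD_eq_getElem _ _ (by omega), List.getElem_drop]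
      congr 1
      omega
    simp only [Function.comp, pvPred, hg1, hg2]

-- the cut list of x :: rest is 0 followed by the shifted cut list of the remainder
theorem cuts_split (x : Int × String) (rest : List (Int × String))
    (hklt : (rest.takeWhile (fun q => decide (x.1 = q.1))).length + 1 < (x :: rest).length) :
    pvCuts (x :: rest) =
      0 :: (pvCuts ((x :: rest).drop ((rest.takeWhile (fun q => decide (x.1 = q.1))).length + 1))).map
        ((rest.takeWhile (fun q => decide (x.1 = q.1))).length + 1 + ·) := by
  set tw := rest.takeWhile (fun q => decide (x.1 = q.1)) with htw
  set fl := x :: rest with hfl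
  set k := tw.length + 1 with hk
  have hb := bnds_split x rest
  simp only [← htw, ← hfl, ← hk] at hb
  rw [if_neg (by omega)] at hb
  have hlen : (fl.drop k).length = fl.length - k := by simp
  have hklt' : k < fl.length := by
    simpa [← htw, ← hk, ← hfl] using hklt
  simp only [pvCuts, hb, hlen, List.map_cons, List.map_append, List.cons_append,
    List.map_nil, Nat.add_zero, Nat.add_sub_cancel' (Nat.le_of_lt hklt')]

-- one-run case: the whole list is a single group
theorem cuts_all (x : Int × String) (rest : List (Int × String))
    (hk : (rest.takeWhile (fun q => decide (x.1 = q.1))).length + 1 = (x :: rest).length) :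
    pvCuts (x :: rest) = [0, (x :: rest).length] := by
  have hb := bnds_split x rest
  rw [if_pos hk] at hb
  unfold pvCuts
  rw [hb]
  rfl

-- pvGrp equals the B port, by strong induction on the length
theorem grp_eq_alt : ∀ (N : Nat) (fl : List (Int × String)), fl.length ≤ N →
    pvGrp fl = joinLetterFreqency_alt fl := by
  intro N
  induction N with
  | zero =>
    intro fl h
    have hfl : fl = [] := List.length_eq_zero_iff.mp (by omega)
    subst hfl
    simp [pvGrp, joinLetterFreqency_alt]
  | succ N ih =>
    intro fl h
    match fl with
    | [] => simp [pvGrp, joinLetterFreqency_alt]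
    | x :: rest =>
      set tw := rest.takeWhile (fun q => decide (x.1 = q.1)) with htw
      set k := tw.length + 1 with hk
      have hkle : k ≤ (x :: rest).length := by
        have := (List.takeWhile_prefix (l := rest) (fun q => decide (x.1 = q.1))).length_le
        rw [← htw] at this
        simp [hk]; omega
      have hdw : rest.dropWhile (fun q => decide (x.1 = q.1)) = (x :: rest).drop k := by
        rw [dropWhile_eq_drop_len_takeWhile, ← htw, hk]
        rfl
      have htk : rest.take tw.length = tw := by
        have hpre := List.prefix_iff_eq_take.mp
          (List.takeWhile_prefix (l := rest) (fun q => decide (x.1 = q.1)))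
        rw [← htw] at hpre
        exact hpre.symm
      have hletters : List.take k (x.2 :: List.map Prod.snd rest) = x.2 :: List.map Prod.snd tw := by
        rw [hk, List.take_succ_cons, ← List.map_take, htk]
      rw [pvGrp_cons, alt_eq_cuts _ (by simp), ← htw, hdw]
      by_cases hkn : k = (x :: rest).length
      · -- single run: drop k is empty, one group containing every letter
        have hdrop : (x :: rest).drop k = [] := by
          rw [List.drop_eq_nil_iff]; omega
        rw [cuts_all x rest (by rw [← htw, ← hk]; exact hkn), hdrop]
        have hgnil : pvGrp ([] : List (Int × String)) = [] := by simp [pvGrp]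
        rw [hgnil]
        simp only [List.zip_cons_cons, List.tail_cons, List.zip_nil_right,
          List.map_cons, List.map_nil, List.drop_zero, Nat.sub_zero]
        rw [← hkn, hletters]
      · have hklt : k < (x :: rest).length := lt_of_le_of_ne hkle hkn
        have hcuts := cuts_split x rest (by rw [← htw, ← hk]; exact hklt)
        simp only [← htw, ← hk] at hcuts
        rw [hcuts]
        -- remainder is nonempty; its cut list starts with 0
        have hlen2 : ((x :: rest).drop k).length = (x :: rest).length - k := by simp
        have hrec : pvGrp ((x :: rest).drop k) = joinLetterFreqency_alt ((x :: rest).drop k) := by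
          apply ih
          simp only [List.length_drop, List.length_cons] at h ⊢
          omega
        have hne2 : (x :: rest).drop k ≠ [] := by
          intro hcon
          have := congrArg List.length hcon
          simp only [hlen2, List.length_nil] at this
          omega
        have hC : pvCuts ((x :: rest).drop k) =
            0 :: ((List.range' 1 (((x :: rest).drop k).length - 1)).filter
              (pvPred ((x :: rest).drop k)) ++ [((x :: rest).drop k).length]) := rfl
        set B := (List.range' 1 (((x :: rest).drop k).length - 1)).filter
            (pvPred ((x :: rest).drop k)) ++ [((x :: rest).drop k).length] with hB
        rw [hC]
        simp only [List.map_cons, List.tail_cons, Nat.add_zero]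
        rw [List.zip_cons_cons, List.map_cons]
        congr 1
        · -- the first group is the letters of the first run
          simp only [List.drop_zero, Nat.sub_zero]
          exact hletters.symm
        · -- the remaining groups are the groups of the remainder, shifted by k
          rw [hrec, alt_eq_cuts _ hne2, hC]
          simp only [List.tail_cons]
          rw [show ((k : Nat) :: List.map (fun x => k + x) B) = List.map (fun x => k + x) (0 :: B) from by
            simp]
          rw [List.zip_map, List.map_map]
          apply List.map_congr_left
          intro p _
          obtain ⟨a, b⟩ := p
          simp only [Function.comp_apply, Prod.map_apply, Nat.add_sub_add_left]
          rw [← List.map_drop, List.drop_drop, List.map_drop]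
          rfl

-- ===== VERDICT (by name: the statement is the Claim_ definition above) =====
theorem joinLetterFreqency_spec : Claim_equal_joinLetterFreqency := by
  intro fl _
  unfold Spec_joinLetterFreqency joinLetterFreqency
  rw [pyOuter_spec fl (fl.length + 1) 0 [] (by omega)]
  simp only [List.nil_append, List.drop_zero]
  exact grp_eq_alt fl.length fl le_rfl
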